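-- pv_equiv track=rewrite | github.com/cmcqueen/simplerandom | python/src/simplerandom/iterators/_iterators_py.py | _geom_series_uint32
-- ===== SOURCE A (Python) =====
-- def _geom_series_uint32(r, n):
--     """Unsigned integer calculation of sum of geometric series:
--     1 + r + r^2 + r^3 + ... r^(n-1)
--     summed to n terms.
--     Calculated modulo 2**32.
--     Use the formula (r**n - 1) / (r - 1)
--     """
--     if n == 0:
--         return 0
--     if n == 1 or r == 0:
--         return 1
--     m = 2**32
--     # Split (r - 1) into common factors with the modulo 2**32 -- i.e. all
--     # factors of 2; and other factors which are coprime with the modulo 2**32.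
--     other_factors = r - 1
--     common_factor = 1
--     while (other_factors % 2) == 0:
--         other_factors //= 2
--         common_factor *= 2
--     other_factors_inverse = pow(other_factors, m - 1, m)
--     numerator = pow(r, n, common_factor * m) - 1
--     return (numerator // common_factor * other_factors_inverse) % m
-- ===== SOURCE B (Python) =====
-- def _geom_series_uint32(r, n):
--     """Sum of geometric series 1 + r + ... + r^(n-1), modulo 2**32,
--     by O(log n) recursive halving instead of the modular-inverse closed form:
--     S(2q) = (1 + r^q) * S(q),  S(2q+1) = 1 + r * S(2q),
--     tracking (S(k) mod 2**32, r^k mod 2**32) together."""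
--     M = 2 ** 32
--
--     def go(k):
--         # returns (sum of k terms mod M, r**k mod M)
--         if k <= 0:
--             return (0, 1 % M)
--         s, p = go(k // 2)
--         s2 = (s + p * s) % M
--         p2 = (p * p) % M
--         if k % 2:
--             return ((s2 * r + 1) % M, (p2 * r) % M)
--         return (s2, p2)
--
--     return go(n)[0]
-- ===== Notes on version B (the rewrite author's own statement) =====
-- stated objective: alternative
-- what changed: Replaces the closed form (split r-1 into a power of 2 and an odd part, modular inverse via pow(u, 2**32-1, 2**32), exact division) by a divide-and-conquer recursion S(2q)=(1+r^q)S(q), S(2q+1)=1+r*S(2q) that keeps (partial sum, power of r) mod 2**32.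
-- outside the precondition, e.g. on _geom_series_uint32(3, -1): A returns 1431655765, B returns 0; on _geom_series_uint32(0, -5): A returns 1, B returns 0; on _geom_series_uint32(2, -1): A raises ValueError, B returns 0
import Mathlib
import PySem

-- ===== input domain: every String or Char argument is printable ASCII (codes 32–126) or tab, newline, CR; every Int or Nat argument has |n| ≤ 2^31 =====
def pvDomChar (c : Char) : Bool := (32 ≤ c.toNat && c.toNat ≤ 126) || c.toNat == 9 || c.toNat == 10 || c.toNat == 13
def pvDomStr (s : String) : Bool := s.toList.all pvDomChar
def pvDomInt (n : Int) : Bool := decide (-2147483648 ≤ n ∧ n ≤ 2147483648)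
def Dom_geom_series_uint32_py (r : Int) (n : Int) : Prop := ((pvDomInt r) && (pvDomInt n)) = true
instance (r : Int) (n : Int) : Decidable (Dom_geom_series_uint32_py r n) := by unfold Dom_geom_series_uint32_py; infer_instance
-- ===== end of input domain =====

-- B replaces A's split/modular-inverse closed form by a divide-and-conquer recursion on the
-- number of terms (same O(log n) cost; objective: alternative algorithm).

-- ===== PORT A =====
-- A's `while (other_factors % 2) == 0` loop, with fuel: inside Pre_ the loop only runs with
-- other_factors = r - 1 ≠ 0, and |r - 1| < 2^64 on Dom, so fuel 64 is never exhausted.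
def pvSplit : Nat → Int → Int → Int × Int
  | 0, ofa, cf => (ofa, cf)
  | f + 1, ofa, cf =>
      if PySem.Int.mod ofa 2 = 0 then pvSplit f (PySem.Int.floordiv ofa 2) (cf * 2)
      else (ofa, cf)

-- Python's three-argument pow is binary modular exponentiation; PySem.Int.powMod is the same
-- function (pvPowMod_eq below) but defined via the full power, which no evaluator can reduce at
-- exponent 2^32 - 1, so pow is ported as the square-and-multiply loop itself (fueled: e < 2^f).
def pvPowMod : Nat → Int → Nat → Int → Int
  | 0, _, _, m => PySem.Int.mod 1 m
  | f + 1, b, e, m =>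
    if e = 0 then PySem.Int.mod 1 m
    else
      let h := pvPowMod f (PySem.Int.mod (b * b) m) (e / 2) m
      if e % 2 = 1 then PySem.Int.mod (b * h) m else h

def geom_series_uint32_py (r : Int) (n : Int) : Int :=
  if n = 0 then 0
  else if n = 1 ∨ r = 0 then 1
  else
    let m : Int := 2 ^ 32
    let oc := pvSplit 64 (r - 1) 1
    let other_factors_inverse := pvPowMod 64 oc.1 (m - 1).toNat m
    let numerator := pvPowMod 64 r n.toNat (oc.2 * m) - 1
    PySem.Int.mod (PySem.Int.floordiv numerator oc.2 * other_factors_inverse) m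

-- ===== PORT B =====
-- Source B's `go(k)`: k is nonnegative everywhere below the top call (k // 2 of a nonnegative int),
-- and `k <= 0` holds at the top only for n ≤ 0, so it is recursed on as a Nat
-- (n.toNat at the call site; n < 0 gives toNat = 0 = go's k ≤ 0 base case, value 0).
-- fuel = 64 makes the halving recursion structural (kernel-reducible); k = n.toNat < 2^64
-- always holds on Dom, so the fuel is never exhausted on any admitted input.
def pvGo : Nat → Int → Nat → Int × Int
  | 0, _, _ => (0, PySem.Int.mod 1 (2 ^ 32))
  | f + 1, r, k =>
    if k = 0 then (0, PySem.Int.mod 1 (2 ^ 32))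
    else
      let sp := pvGo f r (k / 2)
      let s2 := PySem.Int.mod (sp.1 + sp.2 * sp.1) (2 ^ 32)
      let p2 := PySem.Int.mod (sp.2 * sp.2) (2 ^ 32)
      if k % 2 = 1 then (PySem.Int.mod (s2 * r + 1) (2 ^ 32), PySem.Int.mod (p2 * r) (2 ^ 32))
      else (s2, p2)

def geom_series_uint32_py_alt (r : Int) (n : Int) : Int := (pvGo 64 r n.toNat).1

-- ===== PRECONDITION & SPEC =====
-- Pre_ excludes n < 0, where the series has no meaning (A then raises ValueError for even
-- nonzero r, and returns an accidental modular-inverse value for other r while B returns the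
-- empty sum 0), and (r = 1, n ≥ 2), where A's factor-splitting while-loop diverges.
def Pre_geom_series_uint32_py (r : Int) (n : Int) : Prop := 0 ≤ n ∧ ¬(r = 1 ∧ 2 ≤ n)
instance (r : Int) (n : Int) : Decidable (Pre_geom_series_uint32_py r n) := by
  unfold Pre_geom_series_uint32_py; infer_instance

def pvWitness_geom_series_uint32_py : Int × Int := (3, 5)

def Spec_geom_series_uint32_py (r : Int) (n : Int) (out : Int) : Prop :=
  out = geom_series_uint32_py_alt r n
instance (r : Int) (n : Int) (out : Int) : Decidable (Spec_geom_series_uint32_py r n out) := by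
  unfold Spec_geom_series_uint32_py; infer_instance

-- ===== CLAIM (what is proved, stated in full; the proofs are below) =====
def Claim_equal_geom_series_uint32_py : Prop := ∀ (r : Int) (n : Int), Dom_geom_series_uint32_py r n → Pre_geom_series_uint32_py r n → Spec_geom_series_uint32_py r n (geom_series_uint32_py r n)

-- ===== LEMMAS AND PROOFS =====

def pvS (r : Int) (k : Nat) : Int := ∑ i ∈ Finset.range k, r ^ i

theorem pvS_two_mul (r : Int) (q : Nat) : pvS r (2 * q) = pvS r q + r ^ q * pvS r q := by
  unfold pvS
  rw [two_mul, Finset.sum_range_add, Finset.mul_sum]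
  congr 1
  exact Finset.sum_congr rfl fun i _ => by rw [pow_add]

theorem pvS_succ_left (r : Int) (q : Nat) : pvS r (q + 1) = pvS r q * r + 1 := by
  unfold pvS
  rw [geom_sum_succ, mul_comm]

theorem pvGo_eq (f : Nat) (r : Int) (k : Nat) (hk : k < 2 ^ f) :
    pvGo f r k = (pvS r k % 2 ^ 32, r ^ k % 2 ^ 32) := by
  induction f generalizing k with
  | zero =>
    have : k = 0 := by simpa using hk
    subst this
    simp [pvGo, pvS, PySem.Int.mod_eq_emod_of_pos (show (0:Int) < 2^32 from by norm_num)]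
  | succ f ih =>
  rw [pvGo]
  by_cases h0 : k = 0
  · subst h0
    simp [pvS, PySem.Int.mod_eq_emod_of_pos (show (0:Int) < 2^32 from by norm_num)]
  · set q := k / 2 with hq
    have ih2 := ih q (by rw [hq]; rw [pow_succ] at hk; omega)
    simp only [h0, if_false, ih2]
    have hpos : (0:Int) < 2 ^ 32 := by norm_num
    simp only [PySem.Int.mod_eq_emod_of_pos hpos]
    have hmm : ∀ a : Int, a % 2^32 ≡ a [ZMOD 2^32] := fun a => Int.emod_emod_of_dvd a dvd_rfl
    have hs2 : (pvS r (q) % 2^32 + r^(q) % 2^32 * (pvS r (q) % 2^32)) % 2^32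
        = pvS r (2 * (q)) % 2^32 := by
      rw [pvS_two_mul]
      exact ((hmm _).add ((hmm _).mul (hmm _)))
    have hp2 : (r^(q) % 2^32 * (r^(q) % 2^32)) % 2^32 = r^(2*(q)) % 2^32 := by
      rw [two_mul, pow_add]
      exact ((hmm _).mul (hmm _))
    by_cases hodd : k % 2 = 1
    · have hk : k = 2 * (q) + 1 := by omega
      simp only [hodd, if_true]
      rw [Prod.mk.injEq]
      refine ⟨?_, ?_⟩
      · rw [hs2]
        calc (pvS r (2*(q)) % 2^32 * r + 1) % 2^32
            = (pvS r (2*(q)) * r + 1) % 2^32 := ((hmm _).mul_right r).add_right 1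
          _ = pvS r k % 2^32 := by rw [hk, pvS_succ_left]
      · rw [hp2]
        calc (r^(2*(q)) % 2^32 * r) % 2^32
            = (r^(2*(q)) * r) % 2^32 := (hmm _).mul_right r
          _ = r ^ k % 2^32 := by rw [hk]; congr 1; ring
    · have hk : k = 2 * (q) := by omega
      simp only [hodd, if_false]
      rw [hs2, hp2, ← hk]

theorem pvSplit_spec (f : Nat) (x c : Int) (hx : x ≠ 0) (hb : x.natAbs < 2 ^ f) :
    ∃ u v, pvSplit f x c = (u, c * 2 ^ v) ∧ ¬ (2 ∣ u) ∧ x = u * 2 ^ v := by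
  induction f generalizing x c with
  | zero =>
    exfalso
    have : x.natAbs = 0 := by omega
    exact hx (Int.natAbs_eq_zero.mp this)
  | succ f ih =>
    rw [pvSplit]
    by_cases hd : (2:Int) ∣ x
    · obtain ⟨y, hy⟩ := hd
      have hmod : PySem.Int.mod x 2 = 0 := (PySem.Int.mod_eq_zero_iff_dvd x 2).mpr ⟨y, hy⟩
      have hfd : PySem.Int.floordiv x 2 = y := by
        rw [PySem.Int.floordiv_eq_ediv_of_pos (by norm_num)]
        omega
      have hy0 : y ≠ 0 := by rintro rfl; simp at hy; exact hx hy
      have hyb : y.natAbs < 2 ^ f := by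
        have : x.natAbs = 2 * y.natAbs := by rw [hy, Int.natAbs_mul]; rfl
        simp [pow_succ] at hb
        omega
      obtain ⟨u, v, h1, h2, h3⟩ := ih y (c * 2) hy0 hyb
      refine ⟨u, v + 1, ?_, h2, ?_⟩
      · rw [hmod, if_pos rfl, hfd, h1]
        congr 1
        ring
      · rw [hy, h3]; ring
    · have hmod : PySem.Int.mod x 2 ≠ 0 := fun h => hd ((PySem.Int.mod_eq_zero_iff_dvd x 2).mp h)
      rw [if_neg hmod]
      exact ⟨x, 0, by simp, hd, by simp⟩

theorem odd_pow_two_pow (u : Int) (hu : ¬ (2 ∣ u)) (k : Nat) :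
    (2 : Int) ^ (k + 1) ∣ u ^ 2 ^ k - 1 := by
  have hodd : Odd u := Int.odd_iff.mpr (by
    have := Int.emod_two_eq u
    have h2 : u % 2 ≠ 0 := fun h => hu (Int.dvd_of_emod_eq_zero h)
    omega)
  induction k with
  | zero =>
    obtain ⟨m, hm⟩ := hodd
    exact ⟨m, by rw [hm]; ring⟩
  | succ k ih =>
    have h1 : u ^ 2 ^ (k + 1) - 1 = (u ^ 2 ^ k - 1) * (u ^ 2 ^ k + 1) := by
      rw [pow_succ, pow_mul]
      ring
    have hodd2 : (2:Int) ∣ u ^ 2 ^ k + 1 := by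
      rcases hodd.pow (n := 2 ^ k) with ⟨t, ht⟩
      exact ⟨t + 1, by omega⟩
    rw [h1, pow_succ]
    exact mul_dvd_mul ih hodd2
-- the fueled square-and-multiply computes Python's pow(b, e, m) (e < 2^f, 0 < m)
theorem pvPowMod_eq (f : Nat) (b : Int) (e : Nat) (m : Int) (hm : 0 < m) (he : e < 2 ^ f) :
    pvPowMod f b e m = b ^ e % m := by
  induction f generalizing b e with
  | zero =>
    have : e = 0 := by simpa using he
    subst this
    simp [pvPowMod, PySem.Int.mod_eq_emod_of_pos hm]
  | succ f ih =>
    rw [pvPowMod]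
    by_cases h0 : e = 0
    · subst h0
      simp [PySem.Int.mod_eq_emod_of_pos hm]
    · rw [if_neg h0]
      set q := e / 2 with hq
      have ihe := ih (PySem.Int.mod (b * b) m) q (by rw [hq]; rw [pow_succ] at he; omega)
      rw [ihe, PySem.Int.mod_eq_emod_of_pos hm]
      have hmm : ∀ a : Int, a % m ≡ a [ZMOD m] := fun a => Int.emod_emod_of_dvd a dvd_rfl
      have hsq : (b * b % m) ^ q % m = (b * b) ^ q % m := (hmm (b * b)).pow _
      by_cases hodd : e % 2 = 1
      · rw [if_pos hodd, PySem.Int.mod_eq_emod_of_pos hm]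
        have he2 : e = 2 * q + 1 := by omega
        calc b * ((b * b % m) ^ q % m) % m
            = b * ((b * b) ^ q % m) % m := by rw [hsq]
          _ = b * (b * b) ^ q % m := ((hmm _).mul_left b)
          _ = b ^ e % m := by
              congr 1
              have : (b * b) ^ q = b ^ (2 * q) := by rw [two_mul, pow_add]; ring
              rw [this, he2, pow_succ]
              ring
      · rw [if_neg hodd]
        have he2 : e = 2 * q := by omega
        rw [hsq]
        congr 1
        have : (b * b) ^ q = b ^ (2 * q) := by rw [two_mul, pow_add]; ring
        rw [this, he2]

theorem portA_eq (r : Int) (n : Int) (h2 : 2 ≤ n) (hr0 : r ≠ 0) (hr1 : r ≠ 1)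
    (hb : (r - 1).natAbs < 2 ^ 64) (hn64 : n.toNat < 2 ^ 64) :
    geom_series_uint32_py r n = pvS r n.toNat % 2 ^ 32 := by
  obtain ⟨u, v, hsplit, hu, hx⟩ :=
    pvSplit_spec 64 (r - 1) 1 (sub_ne_zero.mpr hr1) hb
  have hn0 : n ≠ 0 := by omega
  have hn1 : ¬(n = 1 ∨ r = 0) := by rintro (h | h) <;> [omega; exact hr0 h]
  set M : Int := 2 ^ 32 with hM
  set cf : Int := 2 ^ v with hcf
  set N : Nat := n.toNat with hN
  set S : Int := pvS r N with hS
  have hMpos : (0:Int) < M := by positivity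
  have hcfpos : (0:Int) < cf := by positivity
  set E : Nat := ((2:Int) ^ 32 - 1).toNat with hE
  have hE1 : E + 1 = 2 ^ 32 := by decide
  -- unfold A to its arithmetic
  have hA : geom_series_uint32_py r n =
      ((r ^ N % (cf * M) - 1) / cf * (u ^ E % M)) % M := by
    rw [geom_series_uint32_py, if_neg hn0, if_neg hn1]
    rw [hsplit]
    simp only [one_mul,
        pvPowMod_eq 64 u ((2:Int) ^ 32 - 1).toNat ((2:Int) ^ 32) (by norm_num) (by norm_num),
        pvPowMod_eq 64 r n.toNat (cf * 2 ^ 32) (by positivity) hn64,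
        PySem.Int.mod_eq_emod_of_pos (show (0:Int) < (2:Int) ^ 32 from by norm_num),
        PySem.Int.floordiv_eq_ediv_of_pos hcfpos]
    rfl
  rw [hA]
  -- the geometric-series factorisation: r^N - 1 = u * S * cf
  have hgeom : r ^ N - 1 = u * S * cf := by
    have hg : S * (r - 1) = r ^ N - 1 := geom_sum_mul r N
    rw [← hg, hx]
    ring
  -- numerator is cf * (u*S - M*Q)
  set Q : Int := r ^ N / (cf * M) with hQ
  have hnum : r ^ N % (cf * M) - 1 = cf * (u * S - M * Q) := by
    rw [Int.emod_def, ← hQ]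
    have : r ^ N - cf * M * Q - 1 = (r ^ N - 1) - cf * (M * Q) := by ring
    rw [this, hgeom]
    ring
  rw [hnum, Int.mul_ediv_cancel_left _ (ne_of_gt hcfpos)]
  -- now pure modular arithmetic mod M
  have hmm : ∀ a : Int, a % M ≡ a [ZMOD M] := fun a => Int.emod_emod_of_dvd a dvd_rfl
  have hUnit : M ∣ u ^ 2 ^ 32 - 1 := by
    have h31 := odd_pow_two_pow u hu 31
    have hfac : u ^ 2 ^ 32 - 1 = (u ^ 2 ^ 31 - 1) * (u ^ 2 ^ 31 + 1) := by
      rw [show (2:Nat) ^ 32 = 2 ^ 31 * 2 by norm_num, pow_mul]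
      ring
    rw [hfac]
    exact Dvd.dvd.mul_right h31 _
  have step1 : (u * S - M * Q) * (u ^ E % M) ≡ (u * S - M * Q) * u ^ E [ZMOD M] :=
    (hmm _).mul_left _
  have hre : (u * S - M * Q) * u ^ E = S * u ^ (E + 1) - M * (Q * u ^ E) := by
    rw [pow_succ]; ring
  have step2 : S * u ^ (E + 1) - M * (Q * u ^ E) ≡ S * u ^ (E + 1) [ZMOD M] := by
    have h0 : M * (Q * u ^ E) ≡ 0 [ZMOD M] := Int.modEq_zero_iff_dvd.mpr (dvd_mul_right _ _)
    have h1 := (Int.ModEq.refl (S * u ^ (E + 1))).sub h0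
    rw [sub_zero] at h1
    exact h1
  have step3 : S * u ^ (E + 1) ≡ S * 1 [ZMOD M] := by
    refine Int.ModEq.mul_left S ?_
    have : u ^ (E + 1) ≡ 1 [ZMOD M] := by
      rw [Int.modEq_iff_dvd]
      simpa [hE1] using (dvd_neg.mpr hUnit)
    exact this
  have : (u * S - M * Q) * (u ^ E % M) ≡ S [ZMOD M] := by
    calc (u * S - M * Q) * (u ^ E % M)
        ≡ (u * S - M * Q) * u ^ E [ZMOD M] := step1
      _ = S * u ^ (E + 1) - M * (Q * u ^ E) := hre
      _ ≡ S * u ^ (E + 1) [ZMOD M] := step2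
      _ ≡ S * 1 [ZMOD M] := step3
      _ = S := by ring
  exact this

-- ===== VERDICT (by name: the statement is the Claim_ definition above) =====
theorem geom_series_uint32_py_spec : Claim_equal_geom_series_uint32_py := by
  intro r n hdom hpre
  obtain ⟨hn, hnot⟩ := hpre
  unfold Spec_geom_series_uint32_py geom_series_uint32_py_alt
  have hdi : -2147483648 ≤ n ∧ n ≤ 2147483648 ∧ -2147483648 ≤ r ∧ r ≤ 2147483648 := by
    simp [Dom_geom_series_uint32_py, pvDomInt] at hdom
    exact ⟨hdom.2.1, hdom.2.2, hdom.1.1, hdom.1.2⟩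
  have hk64 : n.toNat < 2 ^ 64 := by
    have : (2:Nat) ^ 64 = 18446744073709551616 := by norm_num
    omega
  rw [pvGo_eq 64 r n.toNat hk64]
  by_cases h0 : n = 0
  · subst h0
    rw [geom_series_uint32_py, if_pos rfl]
    simp [pvS]
  · by_cases h1 : n = 1 ∨ r = 0
    · rw [geom_series_uint32_py, if_neg h0, if_pos h1]
      have hN1 : (1:Nat) ≤ n.toNat := by omega
      have : pvS r n.toNat = 1 := by
        rcases h1 with h1 | h1
        · subst h1; simp [pvS]
        · subst h1
          show (∑ i ∈ Finset.range n.toNat, (0:Int) ^ i) = 1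
          rw [zero_geom_sum, if_neg (by omega)]
      rw [this]
      norm_num
    · have h1 : n ≠ 1 ∧ r ≠ 0 := ⟨fun h => h1 (Or.inl h), fun h => h1 (Or.inr h)⟩
      have h2 : 2 ≤ n := by omega
      have hr1 : r ≠ 1 := fun h => hnot ⟨h, h2⟩
      have hb : (r - 1).natAbs < 2 ^ 64 := by
        have : (2:Nat) ^ 64 = 18446744073709551616 := by norm_num
        omega
      exact portA_eq r n h2 h1.2 hr1 hb hk64
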